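-- pv_equiv track=rewrite | github.com/yuliakachurovska/AlgoDataStruct | hw11/t11_08_e7031.py | solve
-- ===== SOURCE A (Python) =====
-- def merge_and_count(arr, temp, left, mid, right, t):
--     i = left
--     j = mid + 1
--     k = left
--     count = 0
--
--     l = mid + 1
--     for x in range(left, mid + 1):
--         while l <= right and arr[x] > arr[l] + t:
--             l += 1
--         count += (l - (mid + 1))
--
--     i, j = left, mid + 1
--     while i <= mid and j <= right:
--         if arr[i] <= arr[j]:
--             temp[k] = arr[i]
--             i += 1
--         else:
--             temp[k] = arr[j]
--             j += 1
--         k += 1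
--
--     while i <= mid:
--         temp[k] = arr[i]
--         i += 1
--         k += 1
--
--     while j <= right:
--         temp[k] = arr[j]
--         j += 1
--         k += 1
--
--     for i in range(left, right + 1):
--         arr[i] = temp[i]
--
--     return count
--
-- def solve(arr, temp, left, right, t):
--     if left >= right:
--         return 0
--
--     mid = (left + right) // 2
--     count = solve(arr, temp, left, mid, t)
--     count += solve(arr, temp, mid + 1, right, t)
--     count += merge_and_count(arr, temp, left, mid, right, t)
--
--     return count
-- ===== SOURCE B (Python) =====
-- def solve(arr, temp, left, right, t):
--     # Brute-force significant-inversion count over the original values of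
--     # arr[left..right]: for each j, count earlier i with arr[i] > arr[j] + t.
--     # Unlike A (merge sort), B does not sort arr in place and leaves temp alone;
--     # the equivalence claimed is about the return value only.
--     if left >= right:
--         return 0
--     count = 0
--     for j in range(left + 1, right + 1):
--         aj = arr[j] + t
--         for i in range(left, j):
--             if arr[i] > aj:
--                 count += 1
--     return count
-- ===== Notes on version B (the rewrite author's own statement) =====
-- stated objective: simpler
-- what changed: A counts significant inversions by a recursive merge sort that sorts arr[left..right] in place through temp; B counts the same pairs directly with two nested index loops over the untouched input (and performs none of A's list mutations).
-- outside the precondition, e.g. on solve([2, -1], [0, 0], -2, 1, -1): A returns 4, B returns 5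
import Mathlib
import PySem

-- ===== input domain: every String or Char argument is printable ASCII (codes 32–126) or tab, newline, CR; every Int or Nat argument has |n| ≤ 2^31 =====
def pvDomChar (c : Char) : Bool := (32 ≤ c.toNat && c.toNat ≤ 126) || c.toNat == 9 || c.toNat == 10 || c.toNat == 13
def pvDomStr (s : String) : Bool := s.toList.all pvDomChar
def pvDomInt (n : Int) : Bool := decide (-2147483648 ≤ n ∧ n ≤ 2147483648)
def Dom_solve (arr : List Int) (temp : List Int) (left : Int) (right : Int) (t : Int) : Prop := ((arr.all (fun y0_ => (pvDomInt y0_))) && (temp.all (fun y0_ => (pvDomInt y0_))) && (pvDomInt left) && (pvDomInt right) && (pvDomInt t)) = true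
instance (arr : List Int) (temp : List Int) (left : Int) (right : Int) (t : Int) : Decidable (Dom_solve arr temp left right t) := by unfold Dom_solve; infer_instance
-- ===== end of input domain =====

-- B replaces A's in-place merge-sort counting by a direct two-loop pair count over the
-- original array (simpler, no mutation); A sorts arr[left..right] in place and writes temp —
-- B does neither, so the equivalence claimed here is about the RETURN VALUE only.

-- ===== PORT A =====
-- arr[i] / arr[i] = v, exact on the in-range non-negative indices Pre_solve admits
def pget (a : List Int) (i : Int) : Int := PySem.List.pyGetD a i 0
def pset (a : List Int) (i : Int) (v : Int) : List Int := PySem.List.pySetD a i v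

-- termination helpers (named lemmas with hand proofs, so the ports' fixpoints stay small)
theorem pvDecLe {a b : Int} (h : a ≤ b) : (b + 1 - (a + 1)).toNat < (b + 1 - a).toNat :=
  (Int.toNat_lt_toNat (sub_pos.mpr (lt_of_le_of_lt h (lt_add_one b)))).mpr
    (sub_lt_sub_left (lt_add_one a) (b + 1))

theorem pvDecLt {a b : Int} (h : a < b) : (b - (a + 1)).toNat < (b - a).toNat :=
  (Int.toNat_lt_toNat (sub_pos.mpr h)).mpr (sub_lt_sub_left (lt_add_one a) b)

theorem pvDecPairL {i m j r : Int} (h1 : i ≤ m) (h2 : j ≤ r) :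
    (m + 1 - (i + 1) + (r + 1 - j)).toNat < (m + 1 - i + (r + 1 - j)).toNat :=
  (Int.toNat_lt_toNat (add_pos (sub_pos.mpr (lt_of_le_of_lt h1 (lt_add_one m)))
      (sub_pos.mpr (lt_of_le_of_lt h2 (lt_add_one r))))).mpr
    (add_lt_add_left (sub_lt_sub_left (lt_add_one i) (m + 1)) (r + 1 - j))

theorem pvDecPairR {i m j r : Int} (h1 : i ≤ m) (h2 : j ≤ r) :
    (m + 1 - i + (r + 1 - (j + 1))).toNat < (m + 1 - i + (r + 1 - j)).toNat :=
  (Int.toNat_lt_toNat (add_pos (sub_pos.mpr (lt_of_le_of_lt h1 (lt_add_one m)))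
      (sub_pos.mpr (lt_of_le_of_lt h2 (lt_add_one r))))).mpr
    (add_lt_add_right (sub_lt_sub_left (lt_add_one j) (r + 1)) (m + 1 - i))

-- 'while l <= right and arr[x] > arr[l] + t: l += 1'
def cInner (arr : List Int) (right t ax : Int) (l : Int) : Int :=
  if h : l ≤ right ∧ ax > pget arr l + t then cInner arr right t ax (l + 1) else l
termination_by (right + 1 - l).toNat
decreasing_by exact pvDecLe h.1

-- 'for x in range(left, mid+1): … count += (l - (mid+1))'
def cLoop (arr : List Int) (mid right t : Int) (x l count : Int) : Int :=
  if h : x ≤ mid then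
    cLoop arr mid right t (x + 1) (cInner arr right t (pget arr x) l)
      (count + (cInner arr right t (pget arr x) l - (mid + 1)))
  else count
termination_by (mid + 1 - x).toNat
decreasing_by exact pvDecLe h

-- 'while i <= mid and j <= right: …'
def mLoop (arr : List Int) (mid right : Int) (i j k : Int) (temp : List Int) :
    Int × Int × Int × List Int :=
  if h : i ≤ mid ∧ j ≤ right then
    if pget arr i ≤ pget arr j then
      mLoop arr mid right (i + 1) j (k + 1) (pset temp k (pget arr i))
    else
      mLoop arr mid right i (j + 1) (k + 1) (pset temp k (pget arr j))
  else (i, j, k, temp)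
termination_by (mid + 1 - i + (right + 1 - j)).toNat
decreasing_by
  · exact pvDecPairL h.1 h.2
  · exact pvDecPairR h.1 h.2

-- 'while i <= mid: …'
def tLoopI (arr : List Int) (mid : Int) (i k : Int) (temp : List Int) : Int × List Int :=
  if h : i ≤ mid then tLoopI arr mid (i + 1) (k + 1) (pset temp k (pget arr i)) else (k, temp)
termination_by (mid + 1 - i).toNat
decreasing_by exact pvDecLe h

-- 'while j <= right: …'
def tLoopJ (arr : List Int) (right : Int) (j k : Int) (temp : List Int) : Int × List Int :=
  if h : j ≤ right then tLoopJ arr right (j + 1) (k + 1) (pset temp k (pget arr j)) else (k, temp)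
termination_by (right + 1 - j).toNat
decreasing_by exact pvDecLe h

-- 'for i in range(left, right+1): arr[i] = temp[i]'
def copyLoop (temp : List Int) (right : Int) (i : Int) (arr : List Int) : List Int :=
  if h : i ≤ right then copyLoop temp right (i + 1) (pset arr i (pget temp i)) else arr
termination_by (right + 1 - i).toNat
decreasing_by exact pvDecLe h

-- merge_and_count: returns (count, arr after copy-back, temp after the merge writes)
def mergeAndCount (arr temp : List Int) (left mid right t : Int) : Int × List Int × List Int :=
  let count := cLoop arr mid right t left (mid + 1) 0
  let r := mLoop arr mid right left (mid + 1) left temp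
  let r2 := tLoopI arr mid r.1 r.2.2.1 r.2.2.2
  let r3 := tLoopJ arr right r.2.1 r2.1 r2.2
  (count, copyLoop r3.2 right left arr, r3.2)

-- mid = (left + right) // 2
def pymid (left right : Int) : Int := PySem.Int.floordiv (left + right) 2

theorem pymid_bounds {left right : Int} (h : left < right) :
    left ≤ pymid left right ∧ pymid left right < right := by
  unfold pymid
  constructor
  · exact (PySem.Int.le_floordiv_iff_mul_le zero_lt_two).mpr
      (by rw [mul_two]; exact add_le_add_right h.le left)
  · exact (PySem.Int.floordiv_lt_iff_lt_mul zero_lt_two).mpr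
      (by rw [mul_two]; exact add_lt_add_left h right)

-- solve, threading the mutated arr/temp through the recursion; the Python returns count only
theorem pvDecMidL {left right : Int} (h : left < right) :
    (pymid left right - left).toNat < (right - left).toNat :=
  (Int.toNat_lt_toNat (sub_pos.mpr h)).mpr (sub_lt_sub_right (pymid_bounds h).2 left)

theorem pvDecMidR {left right : Int} (h : left < right) :
    (right - (pymid left right + 1)).toNat < (right - left).toNat :=
  (Int.toNat_lt_toNat (sub_pos.mpr h)).mpr
    (sub_lt_sub_left (Int.lt_add_one_iff.mpr (pymid_bounds h).1) right)

def solveAux (arr temp : List Int) (left right t : Int) : Int × List Int × List Int :=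
  if h : left ≥ right then (0, arr, temp)
  else
    let r1 := solveAux arr temp left (pymid left right) t
    let r2 := solveAux r1.2.1 r1.2.2 (pymid left right + 1) right t
    let r3 := mergeAndCount r2.2.1 r2.2.2 left (pymid left right) right t
    (r1.1 + r2.1 + r3.1, r3.2.1, r3.2.2)
termination_by (right - left).toNat
decreasing_by
  · exact pvDecMidL (not_le.mp h)
  · exact pvDecMidR (not_le.mp h)

def solve (arr : List Int) (temp : List Int) (left : Int) (right : Int) (t : Int) : Int :=
  (solveAux arr temp left right t).1

-- ===== PORT B =====
-- 'for i in range(left, j): if arr[i] > aj: count += 1'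
def altInner (arr : List Int) (aj jEnd : Int) (i count : Int) : Int :=
  if h : i < jEnd then
    altInner arr aj jEnd (i + 1) (if pget arr i > aj then count + 1 else count)
  else count
termination_by (jEnd - i).toNat
decreasing_by exact pvDecLt h

-- 'for j in range(left+1, right+1): …'
def altOuter (arr : List Int) (left right t : Int) (j count : Int) : Int :=
  if h : j ≤ right then
    altOuter arr left right t (j + 1) (altInner arr (pget arr j + t) j left count)
  else count
termination_by (right + 1 - j).toNat
decreasing_by exact pvDecLe h

def solve_alt (arr : List Int) (temp : List Int) (left : Int) (right : Int) (t : Int) : Int :=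
  if left ≥ right then 0 else altOuter arr left right t (left + 1) 0

-- ===== PRECONDITION & SPEC =====
-- Pre_ restricts to the natural domain of a merge sort over arr[left..right] (with the
-- trivial left >= right case, on which A returns 0 without touching the lists): it excludes
-- inputs where A raises IndexError (right beyond arr or temp) and the malformed inputs with
-- negative left (left < right), on which A's negative-index wraparound over the SAME cells
-- it is mutating yields an accidental value.
def Pre_solve (arr : List Int) (temp : List Int) (left : Int) (right : Int) (t : Int) : Prop :=
  right ≤ left ∨ (0 ≤ left ∧ right < (arr.length : Int) ∧ right < (temp.length : Int))
instance (arr : List Int) (temp : List Int) (left : Int) (right : Int) (t : Int) : Decidable (Pre_solve arr temp left right t) := by unfold Pre_solve; infer_instance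

def pvWitness_solve : List Int × List Int × Int × Int × Int := ([3, 1, 2], [0, 0, 0], 0, 2, 0)

def Spec_solve (arr : List Int) (temp : List Int) (left : Int) (right : Int) (t : Int) (out : Int) : Prop := out = solve_alt arr temp left right t
instance (arr : List Int) (temp : List Int) (left : Int) (right : Int) (t : Int) (out : Int) : Decidable (Spec_solve arr temp left right t out) := by unfold Spec_solve; infer_instance

-- ===== CLAIM (what is proved, stated in full; the proofs are below) =====
def Claim_equal_solve : Prop := ∀ (arr : List Int) (temp : List Int) (left : Int) (right : Int) (t : Int), Dom_solve arr temp left right t → Pre_solve arr temp left right t → Spec_solve arr temp left right t (solve arr temp left right t)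

-- ===== LEMMAS AND PROOFS =====

-- the values arr[lo], arr[lo+1], …, arr[hi]
def seg (a : List Int) (lo hi : Int) : List Int :=
  (PySem.List.pyRange lo (hi + 1) 1).map (pget a)

-- #{y in ys : x > y + t}
def cntP (t x : Int) (ys : List Int) : Int := (ys.countP (fun y => decide (x > y + t)) : Int)

-- significant inversions of a list (head against tail, recursively)
def cnt (t : Int) : List Int → Int
  | [] => 0
  | x :: xs => cntP t x xs + cnt t xs

-- cross inversions: pairs (x, y), x from L, y from R, with x > y + t
def cross (t : Int) (R L : List Int) : Int := (L.map (fun x => cntP t x R)).sum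

-- write the values vs at positions k, k+1, …
def setSeg (a : List Int) (k : Int) : List Int → List Int
  | [] => a
  | v :: vs => setSeg (pset a k v) (k + 1) vs

def mle : Int → Int → Bool := fun a b => decide (a ≤ b)

-- the temp produced by mLoop followed by the two tail loops
def mchain (arr : List Int) (mid right : Int) (i j k : Int) (temp : List Int) : List Int :=
  let r := mLoop arr mid right i j k temp
  let r2 := tLoopI arr mid r.1 r.2.2.1 r.2.2.2
  (tLoopJ arr right r.2.1 r2.1 r2.2).2

theorem seg_nil {a : List Int} {lo hi : Int} (h : hi < lo) : seg a lo hi = [] := by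
  simp [seg, PySem.List.pyRange_one_eq_nil (by omega : hi + 1 ≤ lo)]

theorem seg_cons {a : List Int} {lo hi : Int} (h : lo ≤ hi) :
    seg a lo hi = pget a lo :: seg a (lo + 1) hi := by
  rw [seg, PySem.List.pyRange_one_cons (by omega : lo < hi + 1)]; rfl

theorem seg_snoc {a : List Int} {lo hi : Int} (h : lo ≤ hi) :
    seg a lo hi = seg a lo (hi - 1) ++ [pget a hi] := by
  have e : hi - 1 + 1 = hi := by omega
  rw [seg, PySem.List.pyRange_one_succ_right (by omega : lo ≤ hi), List.map_append, seg, e]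
  rfl

theorem seg_split {a : List Int} {lo m hi : Int} (h1 : lo ≤ m + 1) (h2 : m ≤ hi) :
    seg a lo hi = seg a lo m ++ seg a (m + 1) hi := by
  rw [seg, PySem.List.pyRange_one_append lo (m + 1) (hi + 1) h1 (by omega), List.map_append]
  rfl

theorem seg_congr {a b : List Int} {lo hi : Int}
    (h : ∀ q, lo ≤ q → q ≤ hi → pget a q = pget b q) : seg a lo hi = seg b lo hi := by
  unfold seg
  refine List.map_congr_left ?_
  intro q hq
  rw [PySem.List.mem_pyRange_one] at hq
  exact h q hq.1 (by omega)

theorem seg_length (a : List Int) (lo hi : Int) : (seg a lo hi).length = (hi + 1 - lo).toNat := by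
  simp [seg, PySem.List.length_pyRange_one]

theorem seg_getElem (a : List Int) (lo hi : Int) (n : Nat) (hn : n < (seg a lo hi).length) :
    (seg a lo hi)[n] = pget a (lo + n) := by
  simp only [seg, List.getElem_map]
  rw [PySem.List.getElem_pyRange_one]

theorem pget_pset {a : List Int} {i : Int} (v : Int) (q : Int) (hq : 0 ≤ q)
    (h0 : 0 ≤ i) (h1 : i < (a.length : Int)) :
    pget (pset a i v) q = if q = i then v else pget a q := by
  obtain ⟨n, rfl⟩ : ∃ n : Nat, i = (n : Int) := ⟨i.toNat, by omega⟩
  obtain ⟨m, rfl⟩ : ∃ m : Nat, q = (m : Int) := ⟨q.toNat, by omega⟩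
  have hn : n < a.length := by exact_mod_cast h1
  rw [pget, pget, pset, PySem.List.pyGetD_pySetD_natCast a n m v 0 hn]
  by_cases hmn : m = n
  · simp [hmn]
  · rw [if_neg hmn, if_neg (by exact_mod_cast hmn)]

theorem length_pset (a : List Int) (i v : Int) : (pset a i v).length = a.length :=
  PySem.List.length_pySetD a i v

theorem length_setSeg (vs : List Int) : ∀ (a : List Int) (k : Int),
    (setSeg a k vs).length = a.length := by
  induction vs with
  | nil => intro a k; rfl
  | cons v vs ih => intro a k; rw [setSeg, ih, length_pset]

theorem pget_setSeg_out (vs : List Int) : ∀ (a : List Int) (k q : Int), 0 ≤ k → 0 ≤ q →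
    k + (vs.length : Int) ≤ (a.length : Int) → (q < k ∨ k + (vs.length : Int) ≤ q) →
    pget (setSeg a k vs) q = pget a q := by
  induction vs with
  | nil => intro a k q _ _ _ _; rfl
  | cons v vs ih =>
    intro a k q hk hq hlen hout
    rw [List.length_cons] at hlen hout
    push_cast at hlen hout
    rw [setSeg, ih (pset a k v) (k + 1) q (by omega) hq
      (by rw [length_pset]; omega) (by omega)]
    rw [pget_pset v q hq hk (by omega)]
    rw [if_neg (by omega)]

theorem seg_setSeg (vs : List Int) : ∀ (a : List Int) (k : Int), 0 ≤ k →
    k + (vs.length : Int) ≤ (a.length : Int) →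
    seg (setSeg a k vs) k (k + (vs.length : Int) - 1) = vs := by
  induction vs with
  | nil =>
    intro a k hk hlen
    exact seg_nil (by simp)
  | cons v vs ih =>
    intro a k hk hlen
    simp only [List.length_cons] at hlen ⊢
    push_cast at hlen ⊢
    rw [seg_cons (by omega), setSeg]
    have hh : pget (setSeg (pset a k v) (k + 1) vs) k = v := by
      rw [pget_setSeg_out vs (pset a k v) (k + 1) k (by omega) hk
        (by rw [length_pset]; omega) (by omega)]
      rw [pget_pset v k hk hk (by omega), if_pos rfl]
    have ht2 : seg (setSeg (pset a k v) (k + 1) vs) (k + 1) (k + ((vs.length : Int) + 1) - 1) = vs := by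
      rw [show k + ((vs.length : Int) + 1) - 1 = k + 1 + (vs.length : Int) - 1 by ring]
      exact ih (pset a k v) (k + 1) (by omega) (by rw [length_pset]; omega)
    rw [hh, ht2]

theorem cnt_append (t : Int) (L R : List Int) :
    cnt t (L ++ R) = cnt t L + cnt t R + cross t R L := by
  induction L with
  | nil => simp [cnt, cross]
  | cons x L ih =>
    rw [List.cons_append, cnt, cnt, ih]
    have : cntP t x (L ++ R) = cntP t x L + cntP t x R := by
      simp [cntP, List.countP_append]
    rw [this]
    simp [cross]
    ring

theorem cnt_snoc (t : Int) (L : List Int) (y : Int) :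
    cnt t (L ++ [y]) = cnt t L + ((L.countP (fun x => decide (x > y + t)) : Nat) : Int) := by
  rw [cnt_append]
  have h1 : cnt t [y] = 0 := by simp [cnt, cntP]
  have h2 : cross t [y] L = ((L.countP (fun x => decide (x > y + t)) : Nat) : Int) := by
    unfold cross
    have : ∀ x : Int, cntP t x [y] = if decide (x > y + t) then (1 : Int) else 0 := by
      intro x; by_cases h : x > y + t <;> simp [cntP, h]
    rw [List.map_congr_left (fun x _ => this x)]
    exact PySem.List.sum_map_ite_one_zero _ L
  rw [h1, h2]; ring

theorem cross_perm_left {t : Int} {R L L' : List Int} (h : L.Perm L') :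
    cross t R L = cross t R L' :=
  List.Perm.sum_eq (h.map _)

theorem cross_perm_right {t : Int} {R R' L : List Int} (h : R.Perm R') :
    cross t R L = cross t R' L := by
  unfold cross
  congr 1
  exact List.map_congr_left (fun x _ => by simp [cntP, h.countP_eq])

-- index-monotone reading of a sorted segment
theorem sortedSeg_of_pairwise {a : List Int} {lo hi : Int}
    (h : (seg a lo hi).Pairwise (· ≤ ·)) :
    ∀ p q, lo ≤ p → p ≤ q → q ≤ hi → pget a p ≤ pget a q := by
  intro p q hp hpq hq
  rcases eq_or_lt_of_le hpq with rfl | hlt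
  · exact le_refl _
  · rw [List.pairwise_iff_getElem] at h
    have hlen : (seg a lo hi).length = (hi + 1 - lo).toNat := seg_length a lo hi
    have h1 : (p - lo).toNat < (seg a lo hi).length := by omega
    have h2 : (q - lo).toNat < (seg a lo hi).length := by omega
    have := h (p - lo).toNat (q - lo).toNat h1 h2 (by omega)
    rw [seg_getElem a lo hi _ h1, seg_getElem a lo hi _ h2] at this
    rw [show lo + ((p - lo).toNat : Int) = p by omega,
        show lo + ((q - lo).toNat : Int) = q by omega] at this
    exact this

theorem countP_pyRange_boundary (pr : Int → Bool) (a r b : Int) (h1 : a ≤ r) (h2 : r ≤ b)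
    (ht : ∀ p, a ≤ p → p < r → pr p = true) (hf : ∀ p, r ≤ p → p < b → pr p = false) :
    (((PySem.List.pyRange a b 1).countP pr : Nat) : Int) = r - a := by
  rw [PySem.List.pyRange_one_append a r b h1 h2, List.countP_append]
  have c1 : (PySem.List.pyRange a r 1).countP pr = (PySem.List.pyRange a r 1).length :=
    List.countP_eq_length.mpr (fun p hp => by
      rw [PySem.List.mem_pyRange_one] at hp
      exact ht p hp.1 hp.2)
  have c2 : (PySem.List.pyRange r b 1).countP pr = 0 :=
    List.countP_eq_zero.mpr (fun p hp => by
      rw [PySem.List.mem_pyRange_one] at hp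
      simp [hf p hp.1 hp.2])
  rw [c1, c2, PySem.List.length_pyRange_one]
  omega

theorem cInner_spec (arr : List Int) (right t ax : Int) : ∀ l, l ≤ right + 1 →
    l ≤ cInner arr right t ax l ∧ cInner arr right t ax l ≤ right + 1 ∧
    (∀ p, l ≤ p → p < cInner arr right t ax l → ax > pget arr p + t) ∧
    (cInner arr right t ax l ≤ right → ¬ ax > pget arr (cInner arr right t ax l) + t) := by
  suffices H : ∀ (n : Nat) (l : Int), (right + 1 - l).toNat ≤ n → l ≤ right + 1 →
      l ≤ cInner arr right t ax l ∧ cInner arr right t ax l ≤ right + 1 ∧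
      (∀ p, l ≤ p → p < cInner arr right t ax l → ax > pget arr p + t) ∧
      (cInner arr right t ax l ≤ right → ¬ ax > pget arr (cInner arr right t ax l) + t) by
    exact fun l hl => H (right + 1 - l).toNat l le_rfl hl
  intro n
  induction n with
  | zero =>
    intro l hn hl
    have hl' : l = right + 1 := by omega
    rw [cInner, dif_neg (by omega)]
    exact ⟨le_rfl, hl, fun p hp hp2 => by omega, fun h => by omega⟩
  | succ n ih =>
    intro l hn hl
    by_cases hc : l ≤ right ∧ ax > pget arr l + t
    · rw [cInner, dif_pos hc]
      obtain ⟨ih1, ih2, ih3, ih4⟩ := ih (l + 1) (by omega) (by omega)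
      refine ⟨by omega, ih2, ?_, ih4⟩
      intro p hp hp2
      rcases eq_or_lt_of_le hp with rfl | hlt
      · exact hc.2
      · exact ih3 p (by omega) hp2
    · rw [cInner, dif_neg hc]
      refine ⟨le_rfl, hl, fun p hp hp2 => by omega, fun h => ?_⟩
      intro hgt
      exact hc ⟨h, hgt⟩

theorem cLoop_spec (arr : List Int) (mid right t : Int) :
    ∀ x l c, x ≤ mid + 1 → mid + 1 ≤ l → l ≤ right + 1 →
    (∀ p, mid + 1 ≤ p → p < l → x ≤ mid → pget arr x > pget arr p + t) →
    (∀ p q, x ≤ p → p ≤ q → q ≤ mid → pget arr p ≤ pget arr q) →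
    (∀ p q, mid + 1 ≤ p → p ≤ q → q ≤ right → pget arr p ≤ pget arr q) →
    cLoop arr mid right t x l c = c + cross t (seg arr (mid + 1) right) (seg arr x mid) := by
  suffices H : ∀ (n : Nat) (x l c : Int), (mid + 1 - x).toNat ≤ n → x ≤ mid + 1 → mid + 1 ≤ l →
      l ≤ right + 1 →
      (∀ p, mid + 1 ≤ p → p < l → x ≤ mid → pget arr x > pget arr p + t) →
      (∀ p q, x ≤ p → p ≤ q → q ≤ mid → pget arr p ≤ pget arr q) →
      (∀ p q, mid + 1 ≤ p → p ≤ q → q ≤ right → pget arr p ≤ pget arr q) →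
      cLoop arr mid right t x l c = c + cross t (seg arr (mid + 1) right) (seg arr x mid) by
    exact fun x l c hx hl hlr hinv hLs hRs =>
      H (mid + 1 - x).toNat x l c le_rfl hx hl hlr hinv hLs hRs
  intro n
  induction n with
  | zero =>
    intro x l c hn hx hl hlr hinv hLs hRs
    rw [cLoop, dif_neg (by omega)]
    rw [seg_nil (by omega : mid < x)]
    simp [cross]
  | succ n ih =>
    intro x l c hn hx hl hlr hinv hLs hRs
    by_cases hxm : x ≤ mid
    · rw [cLoop, dif_pos hxm]
      obtain ⟨h1, h2, h3, h4⟩ := cInner_spec arr right t (pget arr x) l hlr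
      set l' := cInner arr right t (pget arr x) l with hl'
      have hall : ∀ p, mid + 1 ≤ p → p < l' → pget arr x > pget arr p + t := by
        intro p hp hp2
        by_cases hpl : p < l
        · exact hinv p hp hpl hxm
        · exact h3 p (by omega) hp2
      have hnone : ∀ p, l' ≤ p → p ≤ right → ¬ pget arr x > pget arr p + t := by
        intro p hp hpr hgt
        have hstop := h4 (by omega)
        have hmono : pget arr l' ≤ pget arr p := hRs l' p (by omega) hp hpr
        omega
      have hcnt : cntP t (pget arr x) (seg arr (mid + 1) right) = l' - (mid + 1) := by
        unfold cntP seg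
        rw [List.countP_map]
        exact countP_pyRange_boundary _ (mid + 1) l' (right + 1) (by omega) (by omega)
          (fun p hp hp2 => by simpa using hall p hp hp2)
          (fun p hp hp2 => by simpa using hnone p hp (by omega))
      rw [ih (x + 1) l' (c + (l' - (mid + 1))) (by omega) (by omega) (by omega) (by omega)
        (fun p hp hpl hx1 => by
          have hax : pget arr x ≤ pget arr (x + 1) := hLs x (x + 1) le_rfl (by omega) hx1
          have := hall p hp hpl
          omega)
        (fun p q hp hpq hq => hLs p q (by omega) hpq hq) hRs]
      rw [seg_cons (hxm : x ≤ mid)]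
      simp only [cross, List.map_cons, List.sum_cons]
      rw [hcnt]
      ring
    · rw [cLoop, dif_neg hxm]
      rw [seg_nil (by omega : mid < x)]
      simp [cross]

theorem tLoopI_spec (arr : List Int) (mid : Int) : ∀ i k temp,
    tLoopI arr mid i k temp = (k + ((seg arr i mid).length : Int), setSeg temp k (seg arr i mid)) := by
  suffices H : ∀ (n : Nat) (i k : Int) (temp : List Int), (mid + 1 - i).toNat ≤ n →
      tLoopI arr mid i k temp =
        (k + ((seg arr i mid).length : Int), setSeg temp k (seg arr i mid)) by
    exact fun i k temp => H (mid + 1 - i).toNat i k temp le_rfl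
  intro n
  induction n with
  | zero =>
    intro i k temp hn
    rw [tLoopI, dif_neg (by omega), seg_nil (by omega : mid < i)]
    simp [setSeg]
  | succ n ih =>
    intro i k temp hn
    by_cases hi : i ≤ mid
    · rw [tLoopI, dif_pos hi, ih (i + 1) (k + 1) (pset temp k (pget arr i)) (by omega)]
      rw [seg_cons hi, setSeg]
      rw [Prod.ext_iff]
      refine ⟨?_, rfl⟩
      simp only [List.length_cons]
      push_cast; ring
    · rw [tLoopI, dif_neg hi, seg_nil (by omega : mid < i)]
      simp [setSeg]

theorem tLoopJ_spec (arr : List Int) (right : Int) : ∀ j k temp,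
    tLoopJ arr right j k temp = (k + ((seg arr j right).length : Int), setSeg temp k (seg arr j right)) := by
  suffices H : ∀ (n : Nat) (j k : Int) (temp : List Int), (right + 1 - j).toNat ≤ n →
      tLoopJ arr right j k temp =
        (k + ((seg arr j right).length : Int), setSeg temp k (seg arr j right)) by
    exact fun j k temp => H (right + 1 - j).toNat j k temp le_rfl
  intro n
  induction n with
  | zero =>
    intro j k temp hn
    rw [tLoopJ, dif_neg (by omega), seg_nil (by omega : right < j)]
    simp [setSeg]
  | succ n ih =>
    intro j k temp hn
    by_cases hj : j ≤ right
    · rw [tLoopJ, dif_pos hj, ih (j + 1) (k + 1) (pset temp k (pget arr j)) (by omega)]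
      rw [seg_cons hj, setSeg]
      rw [Prod.ext_iff]
      refine ⟨?_, rfl⟩
      simp only [List.length_cons]
      push_cast; ring
    · rw [tLoopJ, dif_neg hj, seg_nil (by omega : right < j)]
      simp [setSeg]

theorem mchain_eq (arr : List Int) (mid right : Int) : ∀ (n : Nat) (i j k : Int) (temp : List Int),
    (mid + 1 - i).toNat + (right + 1 - j).toNat ≤ n →
    mchain arr mid right i j k temp = setSeg temp k ((seg arr i mid).merge (seg arr j right) mle) := by
  intro n
  induction n with
  | zero =>
    intro i j k temp hn
    have hi : mid < i := by omega
    have hj : right < j := by omega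
    simp only [mchain]
    rw [mLoop, dif_neg (by omega)]
    dsimp only
    rw [tLoopI_spec, tLoopJ_spec, seg_nil hi, seg_nil hj]
    simp [setSeg]
  | succ n ih =>
    intro i j k temp hn
    by_cases hg : i ≤ mid ∧ j ≤ right
    · rw [seg_cons hg.1, seg_cons hg.2, List.cons_merge_cons]
      by_cases hle : pget arr i ≤ pget arr j
      · have hstep : mLoop arr mid right i j k temp =
            mLoop arr mid right (i + 1) j (k + 1) (pset temp k (pget arr i)) := by
          rw [mLoop, dif_pos hg, if_pos hle]
        rw [show mle (pget arr i) (pget arr j) = true by simp [mle, hle], if_pos rfl]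
        simp only [mchain]
        rw [hstep]
        have := ih (i + 1) j (k + 1) (pset temp k (pget arr i)) (by omega)
        simp only [mchain] at this
        rw [this, seg_cons hg.2]
        rfl
      · have hstep : mLoop arr mid right i j k temp =
            mLoop arr mid right i (j + 1) (k + 1) (pset temp k (pget arr j)) := by
          rw [mLoop, dif_pos hg, if_neg hle]
        rw [show mle (pget arr i) (pget arr j) = false by simp [mle]; omega, if_neg (by simp)]
        simp only [mchain]
        rw [hstep]
        have := ih i (j + 1) (k + 1) (pset temp k (pget arr j)) (by omega)
        simp only [mchain] at this
        rw [this, seg_cons hg.1]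
        rfl
    · simp only [mchain]
      rw [mLoop, dif_neg hg]
      dsimp only
      rw [tLoopI_spec, tLoopJ_spec]
      rcases (by omega : mid < i ∨ right < j) with hi | hj
      · rw [seg_nil hi, List.nil_merge]
        simp [setSeg]
      · rw [seg_nil hj, List.merge_right]
        simp [setSeg]

theorem copyLoop_spec (temp : List Int) (right : Int) : ∀ i arr,
    copyLoop temp right i arr = setSeg arr i (seg temp i right) := by
  suffices H : ∀ (n : Nat) (i : Int) (arr : List Int), (right + 1 - i).toNat ≤ n →
      copyLoop temp right i arr = setSeg arr i (seg temp i right) by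
    exact fun i arr => H (right + 1 - i).toNat i arr le_rfl
  intro n
  induction n with
  | zero =>
    intro i arr hn
    rw [copyLoop, dif_neg (by omega), seg_nil (by omega : right < i)]
    rfl
  | succ n ih =>
    intro i arr hn
    by_cases hi : i ≤ right
    · rw [copyLoop, dif_pos hi, ih (i + 1) (pset arr i (pget temp i)) (by omega)]
      rw [seg_cons hi]
      rfl
    · rw [copyLoop, dif_neg hi, seg_nil (by omega : right < i)]
      rfl

theorem mergeAndCount_spec (arr temp : List Int) (left mid right t : Int)
    (h0 : 0 ≤ left) (h1 : left ≤ mid) (h2 : mid < right)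
    (ha : right < (arr.length : Int)) (htm : right < (temp.length : Int))
    (hL : (seg arr left mid).Pairwise (· ≤ ·)) (hR : (seg arr (mid + 1) right).Pairwise (· ≤ ·)) :
    mergeAndCount arr temp left mid right t =
      (cross t (seg arr (mid + 1) right) (seg arr left mid),
       setSeg arr left ((seg arr left mid).merge (seg arr (mid + 1) right) mle),
       setSeg temp left ((seg arr left mid).merge (seg arr (mid + 1) right) mle)) := by
  have e : mergeAndCount arr temp left mid right t =
      (cLoop arr mid right t left (mid + 1) 0,
       copyLoop (mchain arr mid right left (mid + 1) left temp) right left arr,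
       mchain arr mid right left (mid + 1) left temp) := rfl
  rw [e]
  set M := (seg arr left mid).merge (seg arr (mid + 1) right) mle with hM
  have hlenM : (M.length : Int) = right + 1 - left := by
    rw [hM, List.length_merge, seg_length, seg_length]
    omega
  have hm : mchain arr mid right left (mid + 1) left temp = setSeg temp left M :=
    mchain_eq arr mid right ((mid + 1 - left).toNat + (right + 1 - (mid + 1)).toNat)
      left (mid + 1) left temp le_rfl
  have hc : cLoop arr mid right t left (mid + 1) 0 =
      cross t (seg arr (mid + 1) right) (seg arr left mid) := by
    rw [cLoop_spec arr mid right t left (mid + 1) 0 (by omega) le_rfl (by omega)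
      (fun p hp hpl _ => absurd hpl (by omega))
      (sortedSeg_of_pairwise hL) (sortedSeg_of_pairwise hR)]
    ring
  have hsegtemp : seg (setSeg temp left M) left right = M := by
    have := seg_setSeg M temp left h0 (by omega)
    rwa [show left + (M.length : Int) - 1 = right by omega] at this
  rw [hm, hc, copyLoop_spec, hsegtemp]

theorem solveAux_spec : ∀ (n : Nat) (left right : Int) (arr temp : List Int) (t : Int),
    (right - left).toNat ≤ n → 0 ≤ left → left ≤ right →
    right < (arr.length : Int) → right < (temp.length : Int) →
    (solveAux arr temp left right t).1 = cnt t (seg arr left right) ∧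
    (solveAux arr temp left right t).2.1.length = arr.length ∧
    (solveAux arr temp left right t).2.2.length = temp.length ∧
    (∀ q, 0 ≤ q → q < left ∨ right < q → pget (solveAux arr temp left right t).2.1 q = pget arr q) ∧
    (seg (solveAux arr temp left right t).2.1 left right).Perm (seg arr left right) ∧
    (seg (solveAux arr temp left right t).2.1 left right).Pairwise (· ≤ ·) := by
  intro n
  induction n with
  | zero =>
    intro left right arr temp t hn h0 hlr ha htm
    have hg : left = right := by omega
    rw [solveAux, dif_pos (by omega)]
    subst hg
    refine ⟨?_, rfl, rfl, fun q _ _ => rfl, List.Perm.refl _, ?_⟩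
    · rw [seg_cons le_rfl, seg_nil (by omega)]
      simp [cnt, cntP]
    · rw [seg_cons le_rfl, seg_nil (by omega)]
      simp
  | succ n ih =>
    intro left right arr temp t hn h0 hlr ha htm
    by_cases hg : left ≥ right
    · have hg' : left = right := by omega
      rw [solveAux, dif_pos hg]
      subst hg'
      refine ⟨?_, rfl, rfl, fun q _ _ => rfl, List.Perm.refl _, ?_⟩
      · rw [seg_cons le_rfl, seg_nil (by omega)]
        simp [cnt, cntP]
      · rw [seg_cons le_rfl, seg_nil (by omega)]
        simp
    · have hlt : left < right := by omega
      obtain ⟨hm1, hm2⟩ := pymid_bounds hlt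
      set mid := pymid left right with hmid
      have key : solveAux arr temp left right t =
          ((solveAux arr temp left mid t).1 +
             (solveAux (solveAux arr temp left mid t).2.1 (solveAux arr temp left mid t).2.2
               (mid + 1) right t).1 +
             (mergeAndCount
               (solveAux (solveAux arr temp left mid t).2.1 (solveAux arr temp left mid t).2.2
                 (mid + 1) right t).2.1
               (solveAux (solveAux arr temp left mid t).2.1 (solveAux arr temp left mid t).2.2
                 (mid + 1) right t).2.2 left mid right t).1,
           (mergeAndCount
               (solveAux (solveAux arr temp left mid t).2.1 (solveAux arr temp left mid t).2.2
                 (mid + 1) right t).2.1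
               (solveAux (solveAux arr temp left mid t).2.1 (solveAux arr temp left mid t).2.2
                 (mid + 1) right t).2.2 left mid right t).2.1,
           (mergeAndCount
               (solveAux (solveAux arr temp left mid t).2.1 (solveAux arr temp left mid t).2.2
                 (mid + 1) right t).2.1
               (solveAux (solveAux arr temp left mid t).2.1 (solveAux arr temp left mid t).2.2
                 (mid + 1) right t).2.2 left mid right t).2.2) := by
        rw [solveAux, dif_neg hg]
      set a1 := (solveAux arr temp left mid t).2.1 with ha1
      set t1 := (solveAux arr temp left mid t).2.2 with ht1
      obtain ⟨ih1c, ih1la, ih1lt, ih1out, ih1perm, ih1sorted⟩ :=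
        ih left mid arr temp t (by omega) h0 (by omega) (by omega) (by omega)
      rw [← ha1] at ih1la ih1out ih1perm ih1sorted
      rw [← ht1] at ih1lt
      obtain ⟨ih2c, ih2la, ih2lt, ih2out, ih2perm, ih2sorted⟩ :=
        ih (mid + 1) right a1 t1 t (by omega) (by omega) (by omega)
          (by rw [ih1la]; omega) (by rw [ih1lt]; omega)
      set a2 := (solveAux a1 t1 (mid + 1) right t).2.1 with ha2
      set t2 := (solveAux a1 t1 (mid + 1) right t).2.2 with ht2
      -- segments
      have hseg1 : seg a2 left mid = seg a1 left mid :=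
        seg_congr (fun q hq1 hq2 => ih2out q (by omega) (by omega))
      have hseg2 : seg a1 (mid + 1) right = seg arr (mid + 1) right :=
        seg_congr (fun q hq1 hq2 => ih1out q (by omega) (by omega))
      have hLperm : (seg a2 left mid).Perm (seg arr left mid) := by
        rw [hseg1]; exact ih1perm
      have hRperm : (seg a2 (mid + 1) right).Perm (seg arr (mid + 1) right) := by
        have := ih2perm
        rwa [hseg2] at this
      have hLsorted : (seg a2 left mid).Pairwise (· ≤ ·) := by rw [hseg1]; exact ih1sorted
      have hmc := mergeAndCount_spec a2 t2 left mid right t h0 hm1 hm2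
        (by rw [ih2la, ih1la]; omega) (by rw [ih2lt, ih1lt]; omega) hLsorted ih2sorted
      set M := (seg a2 left mid).merge (seg a2 (mid + 1) right) mle with hM
      have hlenM : (M.length : Int) = right + 1 - left := by
        rw [hM, List.length_merge, seg_length, seg_length]
        omega
      have hMperm : M.Perm (seg arr left right) := by
        rw [seg_split (by omega : left ≤ mid + 1) (by omega : mid ≤ right)]
        exact (List.merge_perm_append mle).trans (hLperm.append hRperm)
      have hMsorted : M.Pairwise (· ≤ ·) := by
        have := List.pairwise_merge (le := mle)
          (fun a b c hab hbc => by simp [mle] at *; omega)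
          (fun a b => by simp [mle]; omega)
          (seg a2 left mid) (seg a2 (mid + 1) right)
          (by simpa [mle] using hLsorted) (by simpa [mle] using ih2sorted)
        simpa [mle] using this
      have hla2 : ((a2.length : Int)) = (arr.length : Int) := by rw [ih2la, ih1la]
      have hsegA3 : seg (setSeg a2 left M) left right = M := by
        have := seg_setSeg M a2 left h0 (by omega)
        rwa [show left + (M.length : Int) - 1 = right by omega] at this
      rw [key, hmc]
      refine ⟨?_, ?_, ?_, ?_, ?_, ?_⟩
      · -- count
        show (solveAux arr temp left mid t).1 + (solveAux a1 t1 (mid + 1) right t).1 +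
            cross t (seg a2 (mid + 1) right) (seg a2 left mid) = cnt t (seg arr left right)
        rw [ih1c, ih2c, hseg2]
        rw [cross_perm_right (R' := seg arr (mid + 1) right) hRperm,
            cross_perm_left (L' := seg arr left mid) hLperm]
        rw [seg_split (by omega : left ≤ mid + 1) (by omega : mid ≤ right), cnt_append]
      · show (setSeg a2 left M).length = arr.length
        rw [length_setSeg, ih2la, ih1la]
      · show (setSeg t2 left M).length = temp.length
        rw [length_setSeg, ih2lt, ih1lt]
      · show ∀ q, 0 ≤ q → q < left ∨ right < q → pget (setSeg a2 left M) q = pget arr q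
        intro q hq hout
        rw [pget_setSeg_out M a2 left q h0 hq (by omega) (by omega)]
        rw [ih2out q hq (by omega), ih1out q hq (by omega)]
      · show (seg (setSeg a2 left M) left right).Perm (seg arr left right)
        rw [hsegA3]; exact hMperm
      · show (seg (setSeg a2 left M) left right).Pairwise (· ≤ ·)
        rw [hsegA3]; exact hMsorted

theorem altInner_spec (arr : List Int) (aj : Int) : ∀ (jEnd : Int) (i c : Int),
    altInner arr aj jEnd i c =
      c + (((seg arr i (jEnd - 1)).countP (fun x => decide (x > aj)) : Nat) : Int) := by
  intro jEnd
  suffices H : ∀ (n : Nat) (i c : Int), (jEnd - i).toNat ≤ n →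
      altInner arr aj jEnd i c =
        c + (((seg arr i (jEnd - 1)).countP (fun x => decide (x > aj)) : Nat) : Int) by
    exact fun i c => H (jEnd - i).toNat i c le_rfl
  intro n
  induction n with
  | zero =>
    intro i c hn
    rw [altInner, dif_neg (by omega), seg_nil (by omega : jEnd - 1 < i)]
    simp
  | succ n ih =>
    intro i c hn
    by_cases hi : i < jEnd
    · rw [altInner, dif_pos hi, ih (i + 1) _ (by omega)]
      rw [seg_cons (by omega : i ≤ jEnd - 1), List.countP_cons]
      by_cases hgt : pget arr i > aj
      · rw [if_pos hgt]
        simp only [hgt, decide_true]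
        push_cast
        ring
      · rw [if_neg hgt]
        simp only [hgt, decide_false]
        push_cast
        ring
    · rw [altInner, dif_neg hi, seg_nil (by omega : jEnd - 1 < i)]
      simp

theorem altOuter_spec (arr : List Int) (left right t : Int) : ∀ j c, left < j → j ≤ right + 1 →
    altOuter arr left right t j c =
      c + (cnt t (seg arr left right) - cnt t (seg arr left (j - 1))) := by
  suffices H : ∀ (n : Nat) (j c : Int), (right + 1 - j).toNat ≤ n → left < j → j ≤ right + 1 →
      altOuter arr left right t j c =
        c + (cnt t (seg arr left right) - cnt t (seg arr left (j - 1))) by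
    exact fun j c hj hjr => H (right + 1 - j).toNat j c le_rfl hj hjr
  intro n
  induction n with
  | zero =>
    intro j c hn hj hjr
    have : j = right + 1 := by omega
    subst this
    rw [altOuter, dif_neg (by omega)]
    rw [show right + 1 - 1 = right by ring]
    ring
  | succ n ih =>
    intro j c hn hj hjr
    by_cases hjle : j ≤ right
    · rw [altOuter, dif_pos hjle, altInner_spec,
        ih (j + 1) _ (by omega) (by omega) (by omega)]
      have hsnoc : cnt t (seg arr left j) = cnt t (seg arr left (j - 1)) +
          (((seg arr left (j - 1)).countP (fun x => decide (x > pget arr j + t)) : Nat) : Int) := by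
        rw [seg_snoc (by omega : left ≤ j), cnt_snoc]
      rw [show j + 1 - 1 = j by ring, hsnoc]
      ring
    · have : j = right + 1 := by omega
      subst this
      rw [altOuter, dif_neg (by omega)]
      rw [show right + 1 - 1 = right by ring]
      ring

-- ===== VERDICT (by name: the statement is the Claim_ definition above) =====
theorem solve_spec : Claim_equal_solve := by
  intro arr temp left right t hdom hpre
  unfold Spec_solve
  by_cases hg : left ≥ right
  · rw [show solve arr temp left right t = (solveAux arr temp left right t).1 from rfl]
    rw [solveAux, dif_pos hg]
    rw [solve_alt, if_pos hg]
  · rcases hpre with h | ⟨h0, ha, htm⟩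
    · omega
    · have hb := solveAux_spec (right - left).toNat left right arr temp t le_rfl h0
        (by omega) ha htm
      rw [show solve arr temp left right t = (solveAux arr temp left right t).1 from rfl, hb.1]
      rw [solve_alt, if_neg hg]
      rw [altOuter_spec arr left right t (left + 1) 0 (by omega) (by omega)]
      rw [show left + 1 - 1 = left by ring]
      rw [seg_cons (le_refl left), seg_nil (by omega : left < left + 1)]
      simp only [cnt, cntP, List.countP_nil, Nat.cast_zero]
      omega
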